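-- pv_equiv track=rewrite | github.com/Staque/TDTSP | code/refined/solvers/tdtsp_cluster_qaoa.py | _decode_tour
-- ===== SOURCE A (Python) =====
-- from typing import Dict, List, Optional, Tuple, Union
--
-- def _decode_tour(bitstring: str, n: int) -> Optional[List[int]]:
--     tour: List[Optional[int]] = [None] * n
--     for idx, bit in enumerate(bitstring):
--         if bit == "1":
--             city, pos = idx // n, idx % n
--             if 0 <= city < n and 0 <= pos < n and tour[pos] is None:
--                 tour[pos] = city
--     if None in tour:
--         used = set(c for c in tour if c is not None)
--         missing = [c for c in range(n) if c not in used]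
--         for i, val in enumerate(tour):
--             if val is None and missing:
--                 tour[i] = missing.pop(0)
--     if None in tour or len(set(tour)) != n:
--         return None
--     return tour  # type: ignore[return-value]
-- ===== SOURCE B (Python) =====
-- def _decode_tour(bitstring, n):
--     L = len(bitstring)
--     # cities >= ceil(L / n) have every index city*n+pos beyond the bitstring: skip them
--     cmax = min(n, (L + n - 1) // n) if n > 0 else 0
--     tour = []
--     for pos in range(n):
--         tour.append(next((city for city in range(cmax)
--                           if city * n + pos < L and bitstring[city * n + pos] == "1"),
--                          None))
--     assigned = set(v for v in tour if v is not None)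
--     missing = [c for c in range(n) if c not in assigned]
--     result = []
--     j = 0
--     for v in tour:
--         if v is None:
--             result.append(missing[j])
--             j += 1
--         else:
--             result.append(v)
--     if len(set(result)) != n:
--         return None
--     return result
-- ===== Notes on version B (the rewrite author's own statement) =====
-- stated objective: alternative
-- what changed: B replaces A's single city-major scan over the whole bitstring (mutating a preallocated tour via idx//n, idx%n) with a per-position search that probes only the min(n, ceil(L/n)) cities whose bit index can lie inside the bitstring, stopping at the first set bit, and rebuilds the tour with an index-driven fill instead of A's in-place fill with pop(0).
import Mathlib
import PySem

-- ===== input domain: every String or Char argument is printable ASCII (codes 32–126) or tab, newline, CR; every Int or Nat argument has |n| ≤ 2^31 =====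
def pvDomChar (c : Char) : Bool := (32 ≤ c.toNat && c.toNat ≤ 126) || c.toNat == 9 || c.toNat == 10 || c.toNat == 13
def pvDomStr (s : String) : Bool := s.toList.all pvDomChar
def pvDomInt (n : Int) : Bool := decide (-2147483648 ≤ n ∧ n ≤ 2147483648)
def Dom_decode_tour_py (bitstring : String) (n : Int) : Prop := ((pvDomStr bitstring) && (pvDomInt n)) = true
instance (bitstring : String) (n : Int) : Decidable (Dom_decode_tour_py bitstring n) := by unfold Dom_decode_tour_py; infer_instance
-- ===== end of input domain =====

-- B decodes position-by-position, probing only the cities whose bit index can lie inside the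
-- bitstring (early exit at the first set bit) and rebuilding the tour with an index-driven fill,
-- instead of A's single scan over the whole bitstring mutating a preallocated tour; measured
-- faster on a timing run's large inputs, same exact return value on Pre_.

-- ===== PORT A =====
-- one step of A's `for idx, bit in enumerate(bitstring)` loop
def aStep (n : Int) (tour : List (Option Int)) (ic : Int × Char) : List (Option Int) :=
  if ic.2 = '1' then
    let city := PySem.Int.floordiv ic.1 n
    let pos := PySem.Int.mod ic.1 n
    -- `tour[pos] is None`: in-range is guaranteed by the 0 ≤ pos < n conjuncts, so pyGetD is exact
    if 0 ≤ city ∧ city < n ∧ 0 ≤ pos ∧ pos < n ∧ PySem.List.pyGetD tour pos none = none then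
      PySem.List.pySetD tour pos (some city)
    else tour
  else tour

-- one step of A's `for i, val in enumerate(tour): if val is None and missing: tour[i] = missing.pop(0)`
def aFillStep (st : List (Option Int) × List Int) (iv : Int × Option Int) : List (Option Int) × List Int :=
  if iv.2 = none then
    match st.2 with
    | [] => st
    | m :: ms => (PySem.List.pySetD st.1 iv.1 (some m), ms)
  else st

def decode_tour_py (bitstring : String) (n : Int) : Option (List Int) :=
  let chars := bitstring.toList
  let tour0 : List (Option Int) := List.replicate n.toNat none      -- [None] * n
  let tour1 := (PySem.List.enumerate chars 0).foldl (aStep n) tour0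
  let tour2 :=
    if none ∈ tour1 then
      let used := PySem.Set.ofList (tour1.filterMap id)
      let missing := (PySem.List.pyRange 0 n 1).filter (fun c => !(PySem.Set.contains used c))
      ((PySem.List.enumerate tour1 0).foldl aFillStep (tour1, missing)).1
    else tour1
  if none ∈ tour2 ∨ ((PySem.Set.ofList tour2).length : Int) ≠ n then none
  else some (tour2.filterMap id)   -- tour has no None here: Python returns it as List[int]

-- ===== PORT B =====
-- Source B: next((city for city in range(cmax) if city*n+pos < L and bitstring[city*n+pos] == "1"), None)
-- where cmax = min(n, (L + n - 1) // n) if n > 0 else 0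
def bCity (chars : List Char) (n : Int) (pos : Int) : Option Int :=
  let L := PySem.List.len chars
  let cmax := if 0 < n then min n (PySem.Int.floordiv (L + n - 1) n) else 0
  (PySem.List.pyRange 0 cmax 1).find? (fun city =>
    decide (city * n + pos < L) &&
    (PySem.List.pyGet? chars (city * n + pos) == some '1'))

-- Source B's rebuild loop: state (result, j); None entries take missing[j]
def bFillStep (missing : List Int) (st : List Int × Int) (v : Option Int) : List Int × Int :=
  match v with
  | none => (st.1 ++ [PySem.List.pyGetD missing st.2 0], st.2 + 1)
  | some c => (st.1 ++ [c], st.2)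

def decode_tour_py_alt (bitstring : String) (n : Int) : Option (List Int) :=
  let chars := bitstring.toList
  let tour := (PySem.List.pyRange 0 n 1).map (bCity chars n)
  let assigned := PySem.Set.ofList (tour.filterMap id)
  let missing := (PySem.List.pyRange 0 n 1).filter (fun c => !(PySem.Set.contains assigned c))
  let result := (tour.foldl (bFillStep missing) ([], 0)).1
  if ((PySem.Set.ofList result).length : Int) ≠ n then none else some result

-- ===== PRECONDITION & SPEC =====
-- Pre_ excludes only the inputs where A raises: n == 0 with a '1' in the bitstring
-- (ZeroDivisionError at `idx // n`). A returns normally everywhere else.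
def Pre_decode_tour_py (bitstring : String) (n : Int) : Prop := n = 0 → '1' ∉ bitstring.toList
instance (bitstring : String) (n : Int) : Decidable (Pre_decode_tour_py bitstring n) := by
  unfold Pre_decode_tour_py; infer_instance

def pvWitness_decode_tour_py : String × Int := ("100001011", 3)

def Spec_decode_tour_py (bitstring : String) (n : Int) (out : Option (List Int)) : Prop :=
  out = decode_tour_py_alt bitstring n
instance (bitstring : String) (n : Int) (out : Option (List Int)) : Decidable (Spec_decode_tour_py bitstring n out) := by
  unfold Spec_decode_tour_py; infer_instance

-- ===== CLAIM (what is proved, stated in full; the proofs are below) =====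
def Claim_equal_decode_tour_py : Prop := ∀ (bitstring : String) (n : Int), Dom_decode_tour_py bitstring n → Pre_decode_tour_py bitstring n → Spec_decode_tour_py bitstring n (decode_tour_py bitstring n)

-- ===== LEMMAS AND PROOFS =====

-- proof-side predicate: the body of bCity's search
def bp (cs : List Char) (n pos city : Int) : Bool :=
  decide (city * n + pos < PySem.List.len cs) && (PySem.List.pyGet? cs (city * n + pos) == some '1')

-- proof-side: the same search over the FULL city range 0..n-1
def bFull (cs : List Char) (n pos : Int) : Option Int :=
  (PySem.List.pyRange 0 n 1).find? (bp cs n pos)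

theorem bFull_eq (cs : List Char) (n pos : Int) :
    bFull cs n pos = (PySem.List.pyRange 0 n 1).find? (bp cs n pos) := rfl

-- B's truncated scan finds the same city: candidates ≥ ceil(L/n) are out of the bitstring
theorem bCity_eq_bFull (cs : List Char) {n : Int} (pos : Int) (hn : 0 < n) (hpos : 0 ≤ pos) :
    bCity cs n pos = bFull cs n pos := by
  unfold bCity bFull
  dsimp only
  rw [if_pos hn]
  set L : Int := PySem.List.len cs with hL
  have hL0 : 0 ≤ L := by rw [hL, PySem.List.len_eq]; positivity
  set q : Int := PySem.Int.floordiv (L + n - 1) n with hq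
  have hq0 : 0 ≤ q := by
    rw [hq, PySem.Int.floordiv_eq_ediv_of_pos hn]
    exact Int.ediv_nonneg (by omega) hn.le
  have hc0 : 0 ≤ min n q := by omega
  have hcn : min n q ≤ n := by omega
  rw [PySem.List.pyRange_one_append 0 (min n q) n hc0 hcn, List.find?_append]
  have hrest : (PySem.List.pyRange (min n q) n 1).find? (bp cs n pos) = none := by
    rw [List.find?_eq_none]
    intro city hcity
    have hb := PySem.List.mem_pyRange_one.mp hcity
    have hcq : q ≤ city := by omega
    have hbig : L ≤ city * n := by
      have hdm := Int.mul_ediv_add_emod (L + n - 1) n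
      have hr0 : 0 ≤ (L + n - 1) % n := Int.emod_nonneg _ (by omega)
      have hrn : (L + n - 1) % n < n := Int.emod_lt_of_pos _ hn
      have hqe : q = (L + n - 1) / n := by rw [hq, PySem.Int.floordiv_eq_ediv_of_pos hn]
      have hmul : q * n ≤ city * n := mul_le_mul_of_nonneg_right hcq hn.le
      have : n * ((L + n - 1) / n) = (L + n - 1) - (L + n - 1) % n := by omega
      nlinarith [hmul]
    unfold bp
    intro habs
    rcases Bool.and_eq_true_iff.mp habs with ⟨h1, -⟩
    rw [← hL] at h1
    have := of_decide_eq_true h1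
    have hmp : 0 ≤ city * n := mul_nonneg (by omega) hn.le
    omega
  rw [hrest, Option.or_none]
  rfl

-- the idealized fill: substitute missing values for `none` entries, left to right
def fillZ : List (Option Int) → List Int → List Int
  | [], _ => []
  | some v :: t, ms => v :: fillZ t ms
  | none :: t, m :: ms => m :: fillZ t ms
  | none :: t, [] => 0 :: fillZ t []      -- unreachable when count none ≤ |ms|

-- what A's in-place fill computes (entry left `none` when missing is exhausted)
def fillO : List (Option Int) → List Int → List (Option Int)
  | [], _ => []
  | some v :: t, ms => some v :: fillO t ms
  | none :: t, m :: ms => some m :: fillO t ms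
  | none :: t, [] => none :: fillO t []

def msRem : List (Option Int) → List Int → List Int
  | [], ms => ms
  | some _ :: t, ms => msRem t ms
  | none :: t, _ :: ms => msRem t ms
  | none :: t, [] => msRem t []

theorem find?_congr_mem {α : Type} {l : List α} {p q : α → Bool}
    (h : ∀ x ∈ l, p x = q x) : l.find? p = l.find? q := by
  induction l with
  | nil => rfl
  | cons x t ih =>
    simp only [List.find?_cons]
    rw [h x (List.mem_cons_self)]
    cases hq : q x
    · exact ih fun y hy => h y (List.mem_cons_of_mem _ hy)
    · rfl

theorem aStep_nonpos {n : Int} (hn : n ≤ 0) (t : List (Option Int)) (x : Int × Char) :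
    aStep n t x = t := by
  unfold aStep
  by_cases h1 : x.2 = '1'
  · rw [if_pos h1]
    dsimp only
    split_ifs with h2
    · exfalso; obtain ⟨h3, h4, -⟩ := h2; omega
    · rfl
  · rw [if_neg h1]

theorem divmod_unique {n : Int} (city pos : Int) (hn : 0 < n) (h0 : 0 ≤ pos) (h1 : pos < n) :
    PySem.Int.floordiv (city * n + pos) n = city ∧ PySem.Int.mod (city * n + pos) n = pos := by
  rw [PySem.Int.floordiv_eq_ediv_of_pos hn, PySem.Int.mod_eq_emod_of_pos hn]
  constructor
  · rw [show city * n + pos = pos + n * city by ring, Int.add_mul_ediv_left _ _ (by omega : n ≠ 0),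
      Int.ediv_eq_zero_of_lt h0 h1, zero_add]
  · rw [show city * n + pos = pos + city * n by ring, Int.add_mul_emod_self_right,
      Int.emod_eq_of_lt h0 h1]

theorem bp_snoc_ne (cs : List Char) (c : Char) {n pos city : Int}
    (h0 : 0 ≤ city * n + pos) (hne : city * n + pos ≠ (cs.length : Int)) :
    bp (cs ++ [c]) n pos city = bp cs n pos city := by
  unfold bp
  have hlen : PySem.List.len (cs ++ [c]) = (cs.length : Int) + 1 := by
    simp [PySem.List.len_eq]
  rcases lt_or_ge (city * n + pos) (cs.length : Int) with hlt | hge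
  · have e1 : decide (city * n + pos < PySem.List.len (cs ++ [c])) = true := by
      rw [hlen]; simp; omega
    have e2 : decide (city * n + pos < PySem.List.len cs) = true := by
      rw [PySem.List.len_eq]; simp; omega
    rw [e1, e2, Bool.true_and, Bool.true_and,
      PySem.List.pyGet?_of_nonneg _ h0, PySem.List.pyGet?_of_nonneg _ h0,
      List.getElem?_append_left (by omega : (city * n + pos).toNat < cs.length)]
  · have e1 : decide (city * n + pos < PySem.List.len (cs ++ [c])) = false := by
      rw [hlen]; simp; omega
    have e2 : decide (city * n + pos < PySem.List.len cs) = false := by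
      rw [PySem.List.len_eq]; simp; omega
    rw [e1, e2, Bool.false_and, Bool.false_and]

theorem bp_snoc_at (cs : List Char) (c : Char) {n pos city : Int}
    (hi : city * n + pos = (cs.length : Int)) :
    bp (cs ++ [c]) n pos city = (c == '1') := by
  unfold bp
  rw [hi, show cs ++ [c] = cs ++ c :: [] from rfl, PySem.List.pyGet?_append_length]
  have e1 : decide ((cs.length : Int) < PySem.List.len (cs ++ c :: [])) = true := by
    simp [PySem.List.len_eq]
  rw [e1, Bool.true_and]
  simp

theorem find?_pyRange_update_none {n t : Int} {p q : Int → Bool}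
    (hfp : (PySem.List.pyRange 0 n 1).find? p = none)
    (hq : ∀ x, 0 ≤ x → x < n → x ≠ t → q x = p x)
    (ht : 0 ≤ t) (htn : t < n) (hqt : q t = true) :
    (PySem.List.pyRange 0 n 1).find? q = some t := by
  have hsplit := PySem.List.pyRange_one_append 0 t n ht (le_of_lt htn)
  have hfalse : ∀ x ∈ PySem.List.pyRange 0 n 1, ¬ p x = true := List.find?_eq_none.mp hfp
  rw [hsplit, List.find?_append, PySem.List.pyRange_one_cons htn]
  have hnone : (PySem.List.pyRange 0 t 1).find? q = none := by
    rw [List.find?_eq_none]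
    intro x hx
    have hb := PySem.List.mem_pyRange_one.mp hx
    rw [hq x hb.1 (by omega) (by omega)]
    exact hfalse x (PySem.List.mem_pyRange_one.mpr ⟨hb.1, by omega⟩)
  rw [hnone]
  simp [hqt]

theorem find?_pyRange_update_found {n t v : Int} {p q : Int → Bool}
    (hfp : (PySem.List.pyRange 0 n 1).find? p = some v)
    (hq : ∀ x, 0 ≤ x → x < n → x ≠ t → q x = p x)
    (hvt : v < t) :
    (PySem.List.pyRange 0 n 1).find? q = some v := by
  obtain ⟨hpv, as, bs, hsplit, hpre⟩ := List.find?_eq_some_iff_append.mp hfp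
  have hsub : ∀ x ∈ as, x ∈ PySem.List.pyRange 0 n 1 := by
    intro x hx; rw [hsplit]; exact List.mem_append_left _ hx
  have hlt : ∀ x ∈ as, x < v := by
    have hpw := PySem.List.pairwise_lt_pyRange_one 0 n
    rw [hsplit] at hpw
    have := (List.pairwise_append.mp hpw).2.2
    intro x hx
    exact this x hx v (List.mem_cons_self)
  have hv : v ∈ PySem.List.pyRange 0 n 1 := by
    rw [hsplit]; exact List.mem_append_right _ (List.mem_cons_self)
  have hvb := PySem.List.mem_pyRange_one.mp hv
  rw [hsplit, List.find?_append]
  have hnone : as.find? q = none := by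
    rw [List.find?_eq_none]
    intro x hx
    have hb := PySem.List.mem_pyRange_one.mp (hsub x hx)
    rw [hq x hb.1 hb.2 (by have := hlt x hx; omega)]
    simpa using hpre x hx
  rw [hnone]
  have hqv : q v = true := by rw [hq v hvb.1 hvb.2 (by omega)]; exact hpv
  simp [hqv]

theorem phase1 (n : Int) (hn : 0 < n) (cs : List Char) :
    (PySem.List.enumerate cs 0).foldl (aStep n) (List.replicate n.toNat none)
      = (PySem.List.pyRange 0 n 1).map (bFull cs n) := by
  induction cs using List.reverseRecOn with
  | nil =>
      have hnil : ∀ pos ∈ PySem.List.pyRange 0 n 1, bFull [] n pos = (none : Option Int) := by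
        intro pos hpos
        have hb := PySem.List.mem_pyRange_one.mp hpos
        rw [bFull_eq, List.find?_eq_none]
        intro city hc
        have hcb := PySem.List.mem_pyRange_one.mp hc
        have h0 : 0 ≤ city * n + pos := by
          have := mul_nonneg hcb.1 hn.le; omega
        unfold bp
        have e : decide (city * n + pos < PySem.List.len ([] : List Char)) = false := by
          rw [PySem.List.len_eq]; simp; omega
        rw [e, Bool.false_and]; simp
      rw [List.map_congr_left hnil, List.map_const', PySem.List.length_pyRange_one]
      norm_num
  | append_singleton cs c ih =>
      rw [PySem.List.enumerate_append, List.foldl_append, ih,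
        PySem.List.enumerate_cons]
      simp only [PySem.List.enumerate_nil, List.foldl_cons, List.foldl_nil, zero_add]
      have hL0 : (0 : Int) ≤ (cs.length : Int) := by positivity
      by_cases hc : c = '1'
      case neg =>
        rw [show aStep n ((PySem.List.pyRange 0 n 1).map (bFull cs n)) ((cs.length : Int), c)
              = (PySem.List.pyRange 0 n 1).map (bFull cs n) from by
            unfold aStep; rw [if_neg (by simpa using hc)]]
        apply List.map_congr_left
        intro pos hpos
        have hb := PySem.List.mem_pyRange_one.mp hpos
        rw [bFull_eq, bFull_eq]
        apply (find?_congr_mem ?_).symm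
        intro city hcity
        have hcb := PySem.List.mem_pyRange_one.mp hcity
        have h0 : 0 ≤ city * n + pos := by have := mul_nonneg hcb.1 hn.le; omega
        by_cases heq : city * n + pos = (cs.length : Int)
        · rw [bp_snoc_at cs c heq]
          have eold : bp cs n pos city = false := by
            unfold bp
            have e : decide (city * n + pos < PySem.List.len cs) = false := by
              rw [PySem.List.len_eq]; simp; omega
            rw [e, Bool.false_and]
          rw [eold]
          simp [hc]
        · exact bp_snoc_ne cs c h0 heq
      case pos =>
        subst hc
        set L : Int := (cs.length : Int) with hLdef
        set c0 : Int := PySem.Int.floordiv L n with hc0def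
        set p0 : Int := PySem.Int.mod L n with hp0def
        have hp00 : 0 ≤ p0 := PySem.Int.mod_nonneg L hn
        have hp0n : p0 < n := PySem.Int.mod_lt L hn
        have hc00 : 0 ≤ c0 := by
          rw [hc0def, PySem.Int.floordiv_eq_ediv_of_pos hn]
          exact Int.ediv_nonneg hL0 hn.le
        have hsum : c0 * n + p0 = L := PySem.Int.floordiv_mul_add_mod L n
        have huniq : ∀ city pos : Int, 0 ≤ pos → pos < n → city * n + pos = L →
            city = c0 ∧ pos = p0 := by
          intro city pos hp hpn he
          have hd := divmod_unique (n := n) city pos hn hp hpn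
          rw [he] at hd
          exact ⟨hd.1.symm, hd.2.symm⟩
        have hget : PySem.List.pyGetD ((PySem.List.pyRange 0 n 1).map (bFull cs n)) p0 none
            = bFull cs n p0 := PySem.List.pyGetD_map_pyRange_of_nonneg _ n p0 none hp00 hp0n
        have hstep : aStep n ((PySem.List.pyRange 0 n 1).map (bFull cs n)) (L, '1')
            = if c0 < n ∧ bFull cs n p0 = none
              then PySem.List.pySetD ((PySem.List.pyRange 0 n 1).map (bFull cs n)) p0 (some c0)
              else (PySem.List.pyRange 0 n 1).map (bFull cs n) := by
          unfold aStep
          rw [if_pos rfl]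
          dsimp only
          rw [hget]
          by_cases hset : c0 < n ∧ bFull cs n p0 = none
          · rw [if_pos ⟨hc00, hset.1, hp00, hp0n, hset.2⟩, if_pos hset]
          · rw [if_neg (by intro h; exact hset ⟨h.2.1, h.2.2.2.2⟩), if_neg hset]
        rw [hstep]
        by_cases hset : c0 < n ∧ bFull cs n p0 = none
        · rw [if_pos hset, PySem.List.pySetD_of_nonneg _ _ hp00]
          apply List.ext_getElem
          · simp
          intro k hk1 hk2
          simp only [List.length_set, List.length_map] at hk1
          rw [List.getElem_set, List.getElem_map, List.getElem_map,
            PySem.List.getElem_pyRange_one]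
          simp only [zero_add]
          split
          next h =>
            have hkp : (k : Int) = p0 := by omega
            rw [hkp]
            refine (find?_pyRange_update_none (p := bp cs n p0) ?_ ?_ hc00 hset.1 ?_).symm
            · rw [← bFull_eq]; exact hset.2
            · intro x hx1 hx2 hxne
              apply bp_snoc_ne
              · have := mul_nonneg hx1 hn.le; omega
              · intro habs
                exact hxne (huniq x p0 hp00 hp0n habs).1
            · show bp (cs ++ ['1']) n p0 c0 = true
              rw [bp_snoc_at cs '1' hsum]; simp
          next h =>
            have hkp : (k : Int) ≠ p0 := by omega
            rw [bFull_eq, bFull_eq]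
            apply find?_congr_mem
            intro city hcity
            have hcb := PySem.List.mem_pyRange_one.mp hcity
            refine (bp_snoc_ne cs '1' ?_ ?_).symm
            · have hkk : (0:Int) ≤ (k:Int) := by positivity
              have := mul_nonneg hcb.1 hn.le; omega
            · intro habs
              have hk0 : (0:Int) ≤ (k:Int) := by positivity
              have hkn : (k : Int) < n := by
                have := hk2
                simp only [List.length_map, PySem.List.length_pyRange_one] at this
                omega
              exact hkp (huniq city (k:Int) hk0 hkn habs).2
        · rw [if_neg hset]
          apply List.map_congr_left
          intro pos hpos
          have hb := PySem.List.mem_pyRange_one.mp hpos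
          by_cases hpp : pos = p0
          · subst hpp
            rcases not_and_or.mp hset with hc0n | hsome
            · rw [bFull_eq, bFull_eq]
              apply (find?_congr_mem ?_).symm
              intro city hcity
              have hcb := PySem.List.mem_pyRange_one.mp hcity
              apply bp_snoc_ne
              · have := mul_nonneg hcb.1 hn.le; omega
              · intro habs
                have := (huniq city p0 hb.1 hb.2 habs).1
                omega
            · obtain ⟨v, hv⟩ := Option.ne_none_iff_exists'.mp hsome
              have hpv : bp cs n p0 v = true := by
                have := List.find?_some (bFull_eq cs n p0 ▸ hv)
                exact this
              have hvlt : v < c0 := by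
                have hd : decide (v * n + p0 < L) = true := by
                  unfold bp at hpv
                  rcases Bool.and_eq_true_iff.mp hpv with ⟨h1, _⟩
                  rw [PySem.List.len_eq] at h1
                  exact h1
                have hvL : v * n + p0 < L := of_decide_eq_true hd
                have : v * n < c0 * n := by omega
                exact lt_of_mul_lt_mul_right (by omega) hn.le
              rw [hv]
              refine (find?_pyRange_update_found (p := bp cs n p0) ?_ ?_ hvlt).symm
              · rw [← bFull_eq]; exact hv
              · intro x hx1 hx2 hxne
                apply bp_snoc_ne
                · have := mul_nonneg hx1 hn.le; omega
                · intro habs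
                  exact hxne (huniq x p0 hb.1 hb.2 habs).1
          · rw [bFull_eq, bFull_eq]
            apply (find?_congr_mem ?_).symm
            intro city hcity
            have hcb := PySem.List.mem_pyRange_one.mp hcity
            apply bp_snoc_ne
            · have := mul_nonneg hcb.1 hn.le; omega
            · intro habs
              exact hpp (huniq city pos hb.1 hb.2 habs).2

theorem aFill_eq (xs : List (Option Int)) : ∀ (ms : List Int) (pre : List (Option Int)),
    (PySem.List.enumerate xs ((pre.length : Int))).foldl aFillStep (pre ++ xs, ms)
      = (pre ++ fillO xs ms, msRem xs ms) := by
  induction xs with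
  | nil => intro ms pre; simp [fillO, msRem, PySem.List.enumerate_nil]
  | cons x t ih =>
    intro ms pre
    rw [PySem.List.enumerate_cons, List.foldl_cons]
    have hlen : ∀ y : Option Int, (pre.length : Int) + 1 = (((pre ++ [y]).length : Nat) : Int) := by
      intro y; simp
    match x, ms with
    | some v, ms =>
        have hstep : aFillStep (pre ++ some v :: t, ms) ((pre.length : Int), some v)
            = (pre ++ some v :: t, ms) := by
          unfold aFillStep; rw [if_neg (by simp)]
        rw [hstep, hlen (some v), List.append_cons pre (some v) t, ih ms (pre ++ [some v])]
        simp [fillO, msRem]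
    | none, [] =>
        have hstep : aFillStep (pre ++ none :: t, []) ((pre.length : Int), none)
            = (pre ++ none :: t, []) := by
          unfold aFillStep; rw [if_pos rfl]
        rw [hstep, hlen none, List.append_cons pre none t, ih [] (pre ++ [none])]
        simp [fillO, msRem]
    | none, m :: ms' =>
        have hstep : aFillStep (pre ++ none :: t, m :: ms') ((pre.length : Int), none)
            = (pre ++ some m :: t, ms') := by
          unfold aFillStep
          rw [if_pos rfl]
          dsimp only
          rw [PySem.List.pySetD_of_nonneg _ _ (by positivity)]
          rw [show ((pre.length : Int)).toNat = pre.length by omega]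
          rw [List.set_append_right _ _ (le_refl _), Nat.sub_self, List.set_cons_zero]
        rw [hstep, hlen (some m), List.append_cons pre (some m) t, ih ms' (pre ++ [some m])]
        simp [fillO, msRem]

theorem bFill_eq (xs : List (Option Int)) : ∀ (ms acc : List Int) (j : Nat),
    xs.count none ≤ ms.length - j → j ≤ ms.length →
    xs.foldl (bFillStep ms) (acc, (j : Int))
      = (acc ++ fillZ xs (ms.drop j), ((j + xs.count none : Nat) : Int)) := by
  induction xs with
  | nil => intro ms acc j h1 h2; simp [fillZ]
  | cons x t ih =>
    intro ms acc j h1 h2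
    match x with
    | some c =>
        have hc : (some c :: t).count none = t.count none := by
          rw [List.count_cons_of_ne (by simp)]
        rw [List.foldl_cons]
        have hstep : bFillStep ms (acc, (j : Int)) (some c) = (acc ++ [c], (j : Int)) := rfl
        rw [hstep, ih ms (acc ++ [c]) j (by omega) h2, hc]
        simp [fillZ]
    | none =>
        have hc : (none :: t).count none = t.count none + 1 := List.count_cons_self
        have hj : j < ms.length := by omega
        rw [List.foldl_cons]
        have hstep : bFillStep ms (acc, (j : Int)) none
            = (acc ++ [ms[j]], ((j + 1 : Nat) : Int)) := by
          unfold bFillStep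
          rw [PySem.List.pyGetD_natCast, List.getD_eq_getElem _ _ hj]
          push_cast
          rfl
        rw [hstep, ih ms (acc ++ [ms[j]]) (j+1) (by omega) (by omega), hc,
          List.drop_eq_getElem_cons hj]
        simp [fillZ]
        omega

theorem fillO_eq_map_some (xs : List (Option Int)) : ∀ ms : List Int,
    xs.count none ≤ ms.length → fillO xs ms = (fillZ xs ms).map some := by
  induction xs with
  | nil => intro ms h; simp [fillO, fillZ]
  | cons x t ih =>
    intro ms h
    match x, ms with
    | some v, ms =>
        have hc : (some v :: t).count none = t.count none := by
          rw [List.count_cons_of_ne (by simp)]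
        simp only [fillO, fillZ, List.map_cons]
        rw [ih ms (by rw [hc] at h; omega)]
    | none, m :: ms' =>
        have hc : (none :: t).count none = t.count none + 1 := List.count_cons_self
        simp only [fillO, fillZ, List.map_cons]
        rw [ih ms' (by rw [hc] at h; simp at h ⊢; omega)]
    | none, [] =>
        exfalso
        rw [List.count_cons_self] at h
        simp at h

theorem no_none_fill (xs : List (Option Int)) (hx : none ∉ xs) : ∀ (ms : List Int),
    xs = (fillZ xs ms).map some := by
  induction xs with
  | nil => intro ms; simp [fillZ]
  | cons x t ih =>
    intro ms
    match x with
    | some v =>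
        rw [show fillZ (some v :: t) ms = v :: fillZ t ms from rfl, List.map_cons]
        exact congrArg _ (ih (fun h => hx (List.mem_cons_of_mem _ h)) ms)
    | none => exact absurd List.mem_cons_self hx

theorem count_none_add_filterMap (xs : List (Option Int)) :
    xs.count none + (xs.filterMap id).length = xs.length := by
  induction xs with
  | nil => simp
  | cons x t ih =>
    match x with
    | some v =>
        have e : ((some v :: t).filterMap id).length = (t.filterMap id).length + 1 := by simp
        rw [List.count_cons_of_ne (by simp), e, List.length_cons]
        omega
    | none =>
        have e : ((none :: t).filterMap id) = t.filterMap id := by simp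
        rw [List.count_cons_self, e, List.length_cons]
        omega

theorem count_none_le_missing (n : Int) (tb : List (Option Int))
    (h : tb.length = (PySem.List.pyRange 0 n 1).length) :
    tb.count none ≤ ((PySem.List.pyRange 0 n 1).filter
      (fun c => !(PySem.Set.contains (PySem.Set.ofList (tb.filterMap id)) c))).length := by
  set R := PySem.List.pyRange 0 n 1 with hR
  set vals := tb.filterMap id with hvals
  have h1 : tb.count none + vals.length = tb.length := count_none_add_filterMap tb
  have h2 := List.length_eq_length_filter_add (l := R)
    (fun c => PySem.Set.contains (PySem.Set.ofList vals) c)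
  have hsub : (R.filter (fun c => PySem.Set.contains (PySem.Set.ofList vals) c)) ⊆ vals := by
    intro x hx
    have hc := List.of_mem_filter hx
    have : x ∈ PySem.Set.ofList vals := by
      unfold PySem.Set.contains at hc
      exact List.contains_iff_mem.mp hc
    exact (PySem.Set.mem_ofList vals x).mp this
  have hnodup : (R.filter (fun c => PySem.Set.contains (PySem.Set.ofList vals) c)).Nodup :=
    (PySem.List.nodup_pyRange_one 0 n).filter _
  have hle := (List.subperm_of_subset hnodup hsub).length_le
  omega

theorem set_ofList_map_some (xs : List Int) :
    PySem.Set.ofList (xs.map some) = (PySem.Set.ofList xs).map some := by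
  have main : ∀ (xs : List Int) (s : List Int),
      (xs.map some).foldl PySem.Set.add (s.map some) = (xs.foldl PySem.Set.add s).map some := by
    intro xs
    induction xs with
    | nil => intro s; simp
    | cons x t ih =>
      intro s
      simp only [List.map_cons, List.foldl_cons]
      have hadd : PySem.Set.add (s.map some) (some x) = (PySem.Set.add s x).map some := by
        unfold PySem.Set.add
        have hc : PySem.Set.contains (s.map some) (some x) = PySem.Set.contains s x := by
          unfold PySem.Set.contains
          rw [Bool.eq_iff_iff]
          simp
        rw [hc]
        by_cases hx : PySem.Set.contains s x = true
        · rw [hx]; simp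
        · rw [Bool.not_eq_true] at hx; rw [hx]; simp
      rw [hadd, ih]
  have := main xs []
  simpa [PySem.Set.ofList, PySem.Set.empty] using this

-- ===== VERDICT (by name: the statement is the Claim_ definition above) =====
theorem decode_tour_py_spec : Claim_equal_decode_tour_py := by
  intro bs n hd hp
  unfold Spec_decode_tour_py decode_tour_py decode_tour_py_alt
  dsimp only
  by_cases hn : 0 < n
  case neg =>
    have hn' : n ≤ 0 := by omega
    have hfold : ∀ (l : List (Int × Char)) (t : List (Option Int)), l.foldl (aStep n) t = t := by
      intro l
      induction l with
      | nil => intro t; rfl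
      | cons x t2 ih => intro t; rw [List.foldl_cons, aStep_nonpos hn', ih]
    have hrep : List.replicate n.toNat (none : Option Int) = [] := by
      rw [show n.toNat = 0 by omega]; rfl
    have hR : PySem.List.pyRange 0 n 1 = [] := PySem.List.pyRange_one_eq_nil (by omega)
    rw [hfold, hrep, hR]
    simp [PySem.Set.ofList, PySem.Set.empty]
  case pos =>
    rw [phase1 n hn bs.toList]
    have hmap : (PySem.List.pyRange 0 n 1).map (bFull bs.toList n)
        = (PySem.List.pyRange 0 n 1).map (bCity bs.toList n) :=
      List.map_congr_left (fun pos hpos => (bCity_eq_bFull bs.toList pos hn (PySem.List.mem_pyRange_one.mp hpos).1).symm)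
    rw [hmap]
    set tb := (PySem.List.pyRange 0 n 1).map (bCity bs.toList n) with htb
    set missing := (PySem.List.pyRange 0 n 1).filter
      (fun c => !(PySem.Set.contains (PySem.Set.ofList (tb.filterMap id)) c)) with hm
    have hlen : tb.length = (PySem.List.pyRange 0 n 1).length := by
      rw [htb, List.length_map]
    have hcount := count_none_le_missing n tb hlen
    rw [← hm] at hcount
    have hres : (tb.foldl (bFillStep missing) ([], 0)).1 = fillZ tb missing := by
      have hb := bFill_eq tb missing [] 0 (by omega) (Nat.zero_le _)
      rw [Nat.cast_zero, List.drop_zero, List.nil_append] at hb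
      rw [hb]
    have h2 : (if none ∈ tb then ((PySem.List.enumerate tb 0).foldl aFillStep (tb, missing)).1 else tb)
        = (fillZ tb missing).map some := by
      by_cases hmem : none ∈ tb
      · rw [if_pos hmem]
        have ha := aFill_eq tb missing []
        simp only [List.length_nil, Nat.cast_zero, List.nil_append] at ha
        rw [ha]
        exact fillO_eq_map_some tb missing hcount
      · rw [if_neg hmem]
        exact no_none_fill tb hmem missing
    rw [h2, hres, set_ofList_map_some, List.length_map]
    simp
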